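-- pv_equiv track=rewrite | github.com/abovavg/Coding_Log | 프로그래머스/0/120847. 최댓값 만들기 （1）/최댓값 만들기 （1）.py | solution
-- ===== SOURCE A (Python) =====
-- def solution(numbers):
--     answer = 0
--     mf,bmf = 0,1
--     a = max(numbers)
--     k = numbers.index(max(numbers))
--     for i in numbers:
--         if bmf < i and numbers.index(i) != k:
--             mf = i
--             bmf = mf
--     answer = bmf * a
--     return answer
-- ===== SOURCE B (Python) =====
-- def solution(numbers):
--     a = max(numbers)
--     factor = 1
--     for v in reversed(sorted(numbers)):
--         if v < a:
--             factor = max(1, v)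
--             break
--     return a * factor
-- ===== Notes on version B (the rewrite author's own statement) =====
-- stated objective: faster
-- what changed: Replaces A's loop that calls numbers.index twice per element (quadratic nested scanning) with max, a sort and one descending pass that stops at the first element below the maximum.
import Mathlib
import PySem

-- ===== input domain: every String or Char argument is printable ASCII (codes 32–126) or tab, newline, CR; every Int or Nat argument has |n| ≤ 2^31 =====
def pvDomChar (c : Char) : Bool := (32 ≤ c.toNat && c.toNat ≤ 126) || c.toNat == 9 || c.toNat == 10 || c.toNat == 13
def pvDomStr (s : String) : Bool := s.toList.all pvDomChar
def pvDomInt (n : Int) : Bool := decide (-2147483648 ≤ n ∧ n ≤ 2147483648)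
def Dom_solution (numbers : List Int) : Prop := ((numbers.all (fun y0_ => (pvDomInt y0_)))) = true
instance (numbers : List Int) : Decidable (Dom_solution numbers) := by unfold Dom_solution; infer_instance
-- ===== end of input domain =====

-- B replaces A's quadratic index-scanning loop with max + sort + one descending pass (measured faster).


-- ===== PORT A =====
def solution (numbers : List Int) : Int :=
  match PySem.List.max? numbers (fun y => y) with
  | none => 0  -- unreachable under Pre_: Python's max([]) raises ValueError
  | some a =>
    let k := PySem.List.index? numbers a
    let st := numbers.foldl
      (fun (p : Int × Int) i =>
        if p.2 < i ∧ PySem.List.index? numbers i ≠ k then (i, i) else p)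
      ((0 : Int), (1 : Int))
    st.2 * a

-- ===== PORT B =====
def solution_alt (numbers : List Int) : Int :=
  match PySem.List.max? numbers (fun y => y) with
  | none => 0  -- unreachable under Pre_: Python's max([]) raises ValueError
  | some a =>
    let s := PySem.List.sorted numbers (fun y => y) false
    let factor :=
      match s.reverse.find? (fun v => decide (v < a)) with
      | some v => max 1 v
      | none => 1
    a * factor

-- ===== PRECONDITION & SPEC =====
-- Pre_ excludes only the empty list, on which Python's max raises ValueError.
def Pre_solution (numbers : List Int) : Prop := numbers ≠ []
instance (numbers : List Int) : Decidable (Pre_solution numbers) := by unfold Pre_solution; infer_instance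
def pvWitness_solution : List Int := [3, 2, 1]
def Spec_solution (numbers : List Int) (out : Int) : Prop := out = solution_alt numbers
instance (numbers : List Int) (out : Int) : Decidable (Spec_solution numbers out) := by unfold Spec_solution; infer_instance

-- ===== CLAIM (what is proved, stated in full; the proofs are below) =====
def Claim_equal_solution : Prop := ∀ (numbers : List Int), Dom_solution numbers → Pre_solution numbers → Spec_solution numbers (solution numbers)

-- ===== LEMMAS AND PROOFS =====

-- first-occurrence indices agree exactly when the values agree (for members)
lemma pv_index_eq_iff (xs : List Int) (i a : Int) (hi : i ∈ xs) (ha : a ∈ xs) :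
    PySem.List.index? xs i = PySem.List.index? xs a ↔ i = a := by
  constructor
  · intro h
    obtain ⟨k, hk⟩ := Option.isSome_iff_exists.mp ((PySem.List.index?_isSome_iff xs i).mpr hi)
    obtain ⟨k', hk'⟩ := Option.isSome_iff_exists.mp ((PySem.List.index?_isSome_iff xs a).mpr ha)
    obtain ⟨hlt, hxi, -⟩ := PySem.List.getElem_of_index?_eq_some hk
    obtain ⟨hlt', hxa, -⟩ := PySem.List.getElem_of_index?_eq_some hk'
    have hkk : k = k' := by rw [hk, hk'] at h; exact Option.some.inj h
    subst hkk; rw [← hxi, ← hxa]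
  · intro h; rw [h]

-- the second component of A's pair fold only depends on the second component
lemma pv_foldl_pair_snd (l : List Int) (q : Int → Int → Prop) [∀ b i, Decidable (q b i)] (p : Int × Int) :
    (l.foldl (fun (p : Int × Int) i => if q p.2 i then (i, i) else p) p).2 =
      l.foldl (fun b i => if q b i then i else b) p.2 := by
  induction l generalizing p with
  | nil => rfl
  | cons x t ih =>
    simp only [List.foldl_cons]
    by_cases h : q p.2 x
    · rw [if_pos h, if_pos h, ih]
    · rw [if_neg h, if_neg h, ih]

-- ===== VERDICT (by name: the statement is the Claim_ definition above) =====
theorem solution_spec : Claim_equal_solution := by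
  intro numbers _ hne
  unfold Spec_solution solution solution_alt
  cases hm : PySem.List.max? numbers (fun y => y) with
  | none => exact absurd ((PySem.List.max?_eq_none_iff numbers _).mp hm) hne
  | some a =>
    simp only []
    have ha_mem : a ∈ numbers := PySem.List.max?_mem hm
    have ha_max : ∀ y ∈ numbers, y ≤ a := fun y hy => PySem.List.max?_isMax hm y hy
    -- A's fold collapses to a running max over the elements below a
    have hA : (numbers.foldl
        (fun (p : Int × Int) i =>
          if p.2 < i ∧ PySem.List.index? numbers i ≠ PySem.List.index? numbers a then (i, i) else p)
        ((0 : Int), (1 : Int))).2 =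
        (numbers.filter (fun i => decide (i < a))).foldl max 1 := by
      rw [pv_foldl_pair_snd numbers
        (fun b i => b < i ∧ PySem.List.index? numbers i ≠ PySem.List.index? numbers a) ((0:Int),(1:Int))]
      rw [PySem.List.foldl_congr_mem numbers _
        (fun b i => if i < a then max b i else b) 1 ?_]
      · rw [List.foldl_filter]
        simp only [decide_eq_true_eq]
      · intro acc x hx
        by_cases hxa : x = a
        · subst hxa
          simp only [if_neg (lt_irrefl x)]
          rw [if_neg]
          rintro ⟨-, hidx⟩
          exact hidx rfl
        · have hxlt : x < a := lt_of_le_of_ne (ha_max x hx) hxa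
          simp only []
          rw [if_pos hxlt]
          have hidx : PySem.List.index? numbers x ≠ PySem.List.index? numbers a := by
            intro h; exact hxa ((pv_index_eq_iff numbers x a hx ha_mem).mp h)
          by_cases hlt : acc < x
          · rw [if_pos ⟨hlt, hidx⟩, max_eq_right (le_of_lt hlt)]
          · rw [if_neg (fun h => hlt h.1), max_eq_left (le_of_not_gt hlt)]
    rw [hA]
    -- membership transfer between the reversed sorted list and numbers
    have hmemr : ∀ y : Int, y ∈ (PySem.List.sorted numbers (fun y => y) false).reverse ↔ y ∈ numbers := by
      intro y
      rw [List.mem_reverse]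
      exact (PySem.List.sorted_perm numbers (fun y => y) false).mem_iff
    cases hf : (PySem.List.sorted numbers (fun y => y) false).reverse.find? (fun v => decide (v < a)) with
    | none =>
      have hnone := List.find?_eq_none.mp hf
      have hfil : numbers.filter (fun i => decide (i < a)) = [] := by
        rw [List.filter_eq_nil_iff]
        intro y hy
        have := hnone y ((hmemr y).mpr hy)
        simpa using this
      rw [hfil]
      simp [mul_comm]
    | some m =>
      obtain ⟨hpm, pre, suf, hsplit, hpre⟩ := List.find?_eq_some_iff_append.mp hf
      have hma : m < a := by simpa using hpm
      have hpairwise : List.Pairwise (fun x y : Int => y ≤ x)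
          ((PySem.List.sorted numbers (fun y => y) false).reverse) := by
        rw [List.pairwise_reverse]
        exact PySem.List.sorted_pairwise numbers (fun y => y)
      rw [hsplit] at hpairwise
      have hsuf : ∀ y ∈ suf, y ≤ m := by
        have := (List.pairwise_append.mp hpairwise).2.1
        exact fun y hy => (List.pairwise_cons.mp this).1 y hy
      have hpre_eq : ∀ x ∈ pre, x = a := by
        intro x hx
        have h1 : ¬ (x < a) := by simpa using hpre x hx
        have h2 : x ≤ a := ha_max x ((hmemr x).mp (by rw [hsplit]; exact List.mem_append_left _ hx))
        omega
      have hm_mem : m ∈ numbers.filter (fun i => decide (i < a)) := by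
        rw [List.mem_filter]
        refine ⟨(hmemr m).mp ?_, by simpa using hma⟩
        rw [hsplit]; exact List.mem_append_right _ (List.mem_cons_self)
      have hub : ∀ y ∈ numbers.filter (fun i => decide (i < a)), y ≤ m := by
        intro y hy
        rw [List.mem_filter] at hy
        have hya : y < a := by simpa using hy.2
        have hyr : y ∈ pre ++ m :: suf := by rw [← hsplit]; exact (hmemr y).mpr hy.1
        rcases List.mem_append.mp hyr with h | h
        · exact absurd (hpre_eq y h) (by omega)
        · rcases List.mem_cons.mp h with h | h
          · omega
          · exact hsuf y h
      have hfoldl : (numbers.filter (fun i => decide (i < a))).foldl max 1 = max 1 m := by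
        apply le_antisymm
        · rcases PySem.List.foldl_max_mem (numbers.filter (fun i => decide (i < a))) 1 with h | h
          · rw [h]; exact le_max_left 1 m
          · exact le_trans (hub _ h) (le_max_right 1 m)
        · exact max_le (PySem.List.le_foldl_max _ 1).1 ((PySem.List.le_foldl_max _ 1).2 m hm_mem)
      rw [hfoldl, mul_comm]
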